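-- pv_equiv track=rewrite | github.com/alehdezp/alphaswarm-sol | src/alphaswarm_sol/kg/builder_legacy.py | _divisor_sources
-- ===== SOURCE A (Python) =====
-- def _divisor_sources(
--     source_text_lower: str, parameter_names: list[str], state_var_names: list[str]
-- ) -> list[str]:
--     sources: set[str] = set()
--     for name in parameter_names:
--         lowered = name.lower()
--         if f"/{lowered}" in source_text_lower or f"/ {lowered}" in source_text_lower:
--             sources.add("parameter")
--     for name in state_var_names:
--         lowered = str(name).lower()
--         if f"/{lowered}" in source_text_lower or f"/ {lowered}" in source_text_lower:
--             sources.add("storage")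
--     if "/" in source_text_lower and not sources:
--         sources.add("calculation")
--     return sorted(sources)
-- ===== SOURCE B (Python) =====
-- def _divisor_sources(
--     source_text_lower: str, parameter_names: list[str], state_var_names: list[str]
-- ) -> list[str]:
--     # Single pass over the text: record each candidate start position right
--     # after a '/' (and after '/ '), then test names by prefix at those positions;
--     # the sorted result is built directly (no set, no sort).
--     positions = []
--     for i, ch in enumerate(source_text_lower):
--         if ch == "/":
--             positions.append(i + 1)
--             if source_text_lower.startswith(" ", i + 1):
--                 positions.append(i + 2)
--
--     def found(names):
--         return any(
--             source_text_lower.startswith(name.lower(), j)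
--             for name in names
--             for j in positions
--         )
--
--     has_param = found(parameter_names)
--     has_state = found(state_var_names)
--     if has_param or has_state:
--         return (["parameter"] if has_param else []) + (["storage"] if has_state else [])
--     return ["calculation"] if positions else []
-- ===== Notes on version B (the rewrite author's own statement) =====
-- stated objective: faster
-- what changed: B replaces A's per-name substring scans ('/name' and '/ name' in text) and the set-plus-sorted postprocessing with a single pass over the text that collects the candidate start positions after each '/' and '/ ', prefix-tests the names only at those positions, and builds the already-ordered result list directly with no set and no sort.
import Mathlib
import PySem

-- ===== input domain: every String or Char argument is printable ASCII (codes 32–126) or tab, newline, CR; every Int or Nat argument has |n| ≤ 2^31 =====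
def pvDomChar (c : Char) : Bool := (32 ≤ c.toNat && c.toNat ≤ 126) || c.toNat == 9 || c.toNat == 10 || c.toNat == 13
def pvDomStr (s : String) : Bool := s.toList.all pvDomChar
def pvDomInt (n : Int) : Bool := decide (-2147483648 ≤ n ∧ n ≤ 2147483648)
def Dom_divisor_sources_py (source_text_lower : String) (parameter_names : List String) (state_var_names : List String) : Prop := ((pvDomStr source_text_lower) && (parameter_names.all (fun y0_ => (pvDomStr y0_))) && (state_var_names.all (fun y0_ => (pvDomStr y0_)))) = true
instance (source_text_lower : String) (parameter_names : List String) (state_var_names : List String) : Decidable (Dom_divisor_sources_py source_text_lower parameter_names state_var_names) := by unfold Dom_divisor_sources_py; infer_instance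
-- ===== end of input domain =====

-- B replaces the per-name substring scans and the set+sort with one pass over the text
-- collecting candidate start positions after '/' and '/ ', prefix tests of the names only
-- there, and a directly ordered result (objective: faster; measured faster in a timing run).

-- ===== PORT A =====
-- '"/x" in t' / '"/ x" in t' of A, at the List Char level; f-string concatenation is cons.
def pvAMatch (tl : List Char) (name : String) : Bool :=
  let lowered := PySem.Chars.lower name.toList
  PySem.Chars.isIn ('/' :: lowered) tl || PySem.Chars.isIn ('/' :: ' ' :: lowered) tl

def divisor_sources_py (source_text_lower : String) (parameter_names : List String) (state_var_names : List String) : List String :=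
  let tl := source_text_lower.toList
  let s1 : PySem.Set String :=
    parameter_names.foldl (fun acc name => if pvAMatch tl name then PySem.Set.add acc "parameter" else acc) []
  let s2 : PySem.Set String :=
    state_var_names.foldl (fun acc name => if pvAMatch tl name then PySem.Set.add acc "storage" else acc) s1
  let s3 : PySem.Set String :=
    if PySem.Chars.isIn ['/'] tl && s2.isEmpty then PySem.Set.add s2 "calculation" else s2
  PySem.List.sorted s3 (fun x => x) false

-- ===== PORT B =====
-- the position-collecting loop of B ('for i, ch in enumerate(t): …'), index carried as Nat;
-- 't.startswith(" ", i+1)' is exactly 'startswith rest [' ']' since rest = tl.drop (i+1).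
def pvBPositions : List Char → Nat → List Nat
  | [], _ => []
  | c :: rest, i =>
    if c = '/' then
      (i+1) :: ((if PySem.Chars.startswith rest [' '] then [i+2] else []) ++ pvBPositions rest (i+1))
    else pvBPositions rest (i+1)

-- B's 'found' helper: 't.startswith(name.lower(), j)' is exactly 'startswith (tl.drop j) lowered'
-- for the emitted positions j (all ≤ len tl).
def pvBFound (tl : List Char) (positions : List Nat) (names : List String) : Bool :=
  names.any (fun name => positions.any (fun j => PySem.Chars.startswith (tl.drop j) (PySem.Chars.lower name.toList)))

def divisor_sources_py_alt (source_text_lower : String) (parameter_names : List String) (state_var_names : List String) : List String :=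
  let tl := source_text_lower.toList
  let positions := pvBPositions tl 0
  let hasParam := pvBFound tl positions parameter_names
  let hasState := pvBFound tl positions state_var_names
  if hasParam || hasState then
    (if hasParam then ["parameter"] else []) ++ (if hasState then ["storage"] else [])
  else if positions.isEmpty then [] else ["calculation"]

-- ===== PRECONDITION & SPEC =====
def Spec_divisor_sources_py (source_text_lower : String) (parameter_names : List String) (state_var_names : List String) (out : List String) : Prop := out = divisor_sources_py_alt source_text_lower parameter_names state_var_names
instance (source_text_lower : String) (parameter_names : List String) (state_var_names : List String) (out : List String) : Decidable (Spec_divisor_sources_py source_text_lower parameter_names state_var_names out) := by unfold Spec_divisor_sources_py; infer_instance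

-- ===== CLAIM (what is proved, stated in full; the proofs are below) =====
def Claim_equal_divisor_sources_py : Prop := ∀ (source_text_lower : String) (parameter_names : List String) (state_var_names : List String), Dom_divisor_sources_py source_text_lower parameter_names state_var_names → Spec_divisor_sources_py source_text_lower parameter_names state_var_names (divisor_sources_py source_text_lower parameter_names state_var_names)

-- ===== LEMMAS AND PROOFS =====

-- a cons pattern is a prefix of t.drop j iff t[j] is its head and the rest matches one further
theorem pv_cons_prefix_drop (c : Char) (ys t : List Char) (j : Nat) :
    (c :: ys <+: t.drop j) ↔ t[j]? = some c ∧ ys <+: t.drop (j+1) := by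
  rw [List.cons_prefix_iff]
  constructor
  · rintro ⟨l', hdt, hys⟩
    refine ⟨by rw [← List.head?_drop, hdt]; rfl, ?_⟩
    have h2 : t.drop (j+1) = l' := by rw [← List.tail_drop, hdt]; rfl
    exact h2 ▸ hys
  · rintro ⟨h1, h2⟩
    cases hd : t.drop j with
    | nil =>
      exfalso
      have hh : (t.drop j).head? = t[j]? := List.head?_drop
      rw [hd] at hh; rw [← hh] at h1; simp at h1
    | cons a l'' =>
      have ha : a = c := by
        have hh : (t.drop j).head? = t[j]? := List.head?_drop
        rw [hd] at hh; rw [← hh] at h1; simpa using h1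
      subst ha
      have hl : t.drop (j+1) = l'' := by rw [← List.tail_drop, hd]; rfl
      refine ⟨l'', rfl, ?_⟩
      rw [hl] at h2
      exact h2

theorem pv_startswith_singleton (rest : List Char) (x : Char) :
    PySem.Chars.startswith rest [x] = true ↔ rest[0]? = some x := by
  rw [PySem.Chars.startswith_iff, List.cons_prefix_iff]
  cases rest <;> simp

-- what pvBPositions collects: exactly the indices just after a '/', and after '/ '
theorem pvBPositions_mem (t : List Char) (i j : Nat) :
    j ∈ pvBPositions t i ↔
      ∃ k, t[k]? = some '/' ∧ (j = i + k + 1 ∨ (j = i + k + 2 ∧ t[k+1]? = some ' ')) := by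
  induction t generalizing i with
  | nil => simp [pvBPositions]
  | cons c rest ih =>
    constructor
    · intro hmem
      rw [pvBPositions] at hmem
      by_cases hc : c = '/'
      · rw [if_pos hc] at hmem
        rcases List.mem_cons.1 hmem with h1 | h12
        · exact ⟨0, by simp [hc], Or.inl (by omega)⟩
        rcases List.mem_append.1 h12 with h2 | h3
        · by_cases hs : PySem.Chars.startswith rest [' '] = true
          · rw [if_pos hs] at h2
            have h2' : j = i + 2 := by simpa using h2
            have hr0 := (pv_startswith_singleton rest ' ').1 hs
            exact ⟨0, by simp [hc], Or.inr ⟨by omega, by simpa using hr0⟩⟩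
          · rw [if_neg hs] at h2; simp at h2
        · obtain ⟨k, hk, hj⟩ := (ih (i+1)).1 h3
          refine ⟨k+1, by simpa using hk, ?_⟩
          rcases hj with h | ⟨h, h'⟩
          · exact Or.inl (by omega)
          · exact Or.inr ⟨by omega, by simpa using h'⟩
      · rw [if_neg hc] at hmem
        obtain ⟨k, hk, hj⟩ := (ih (i+1)).1 hmem
        refine ⟨k+1, by simpa using hk, ?_⟩
        rcases hj with h | ⟨h, h'⟩
        · exact Or.inl (by omega)
        · exact Or.inr ⟨by omega, by simpa using h'⟩
    · rintro ⟨k, hk, hj⟩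
      rw [pvBPositions]
      cases k with
      | zero =>
        have hc : c = '/' := by simpa using hk
        rw [if_pos hc]
        rcases hj with h | ⟨h, h'⟩
        · exact List.mem_cons.2 (Or.inl (by omega))
        · have hs : PySem.Chars.startswith rest [' '] = true :=
            (pv_startswith_singleton rest ' ').2 (by simpa using h')
          refine List.mem_cons.2 (Or.inr (List.mem_append.2 (Or.inl ?_)))
          rw [if_pos hs]
          simp
          omega
      | succ k' =>
        have hmem : j ∈ pvBPositions rest (i+1) := by
          refine (ih (i+1)).2 ⟨k', by simpa using hk, ?_⟩
          rcases hj with h | ⟨h, h'⟩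
          · exact Or.inl (by omega)
          · exact Or.inr ⟨by omega, by simpa using h'⟩
        by_cases hc : c = '/'
        · rw [if_pos hc]
          exact List.mem_cons.2 (Or.inr (List.mem_append.2 (Or.inr hmem)))
        · rw [if_neg hc]; exact hmem

-- per name: A's two substring tests say exactly "some collected position starts with the name"
theorem pv_match_eq (tl : List Char) (name : String) :
    pvAMatch tl name
      = (pvBPositions tl 0).any (fun j => PySem.Chars.startswith (tl.drop j) (PySem.Chars.lower name.toList)) := by
  set x := PySem.Chars.lower name.toList with hx
  rw [Bool.eq_iff_iff]
  unfold pvAMatch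
  rw [← hx]
  simp only [Bool.or_eq_true, List.any_eq_true, PySem.Chars.startswith_iff,
    ← PySem.Chars.exists_prefix_drop_iff_isIn]
  constructor
  · rintro (⟨j, hj⟩ | ⟨j, hj⟩)
    · rw [pv_cons_prefix_drop] at hj
      exact ⟨j+1, (pvBPositions_mem tl 0 (j+1)).2 ⟨j, hj.1, Or.inl (by omega)⟩, hj.2⟩
    · rw [pv_cons_prefix_drop] at hj
      obtain ⟨h1, hj2⟩ := hj
      rw [pv_cons_prefix_drop] at hj2
      exact ⟨j+2, (pvBPositions_mem tl 0 (j+2)).2 ⟨j, h1, Or.inr ⟨by omega, hj2.1⟩⟩, hj2.2⟩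
  · rintro ⟨j, hjmem, hjp⟩
    obtain ⟨k, hk, hj⟩ := (pvBPositions_mem tl 0 j).1 hjmem
    rcases hj with h | ⟨h, h'⟩
    · exact Or.inl ⟨k, (pv_cons_prefix_drop _ _ _ _).2 ⟨hk, by rw [show k+1 = j by omega]; exact hjp⟩⟩
    · refine Or.inr ⟨k, (pv_cons_prefix_drop _ _ _ _).2 ⟨hk, (pv_cons_prefix_drop _ _ _ _).2 ⟨h', ?_⟩⟩⟩
      rw [show k+1+1 = j by omega]; exact hjp

-- '"/" in t' says exactly "the position list is nonempty"
theorem pv_slash_eq (tl : List Char) :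
    PySem.Chars.isIn ['/'] tl = !(pvBPositions tl 0).isEmpty := by
  rw [Bool.eq_iff_iff]
  rw [← PySem.Chars.exists_prefix_drop_iff_isIn]
  simp only [Bool.not_eq_true', List.isEmpty_eq_false_iff_exists_mem]
  constructor
  · rintro ⟨j, hj⟩
    rw [pv_cons_prefix_drop] at hj
    exact ⟨j+1, (pvBPositions_mem tl 0 (j+1)).2 ⟨j, hj.1, Or.inl (by omega)⟩⟩
  · rintro ⟨j, hj⟩
    obtain ⟨k, hk, _⟩ := (pvBPositions_mem tl 0 j).1 hj
    exact ⟨k, (pv_cons_prefix_drop _ _ _ _).2 ⟨hk, List.nil_prefix⟩⟩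

-- A's conditional-add loop over a name list adds v iff some name matches
theorem pv_foldl_cond_add (l : List String) (S : PySem.Set String) (v : String) (c : String → Bool) :
    l.foldl (fun acc n => if c n then PySem.Set.add acc v else acc) S
      = if l.any c then PySem.Set.add S v else S := by
  induction l generalizing S with
  | nil => simp
  | cons n rest ih =>
    simp only [List.foldl_cons, List.any_cons]
    by_cases hn : c n = true
    · rw [if_pos hn, ih]
      have ha : (c n || rest.any c) = true := by simp [hn]
      rw [if_pos ha]
      by_cases hr : rest.any c = true
      · rw [if_pos hr, PySem.Set.add_of_mem ((PySem.Set.mem_add _ _ _).2 (Or.inr rfl))]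
      · rw [if_neg hr]
    · rw [if_neg hn, ih]
      simp [Bool.of_not_eq_true hn]

theorem pv_any_match_eq (tl : List Char) (names : List String) :
    names.any (fun n => pvAMatch tl n) = pvBFound tl (pvBPositions tl 0) names := by
  simp only [pvBFound, pv_match_eq]

-- sorted of the concrete result lists (String '<' is evaluated on toList)
theorem pv_sorted_nil : PySem.List.sorted ([] : List String) (fun x => x) false = [] := rfl

theorem pv_sorted_p : PySem.List.sorted ["parameter"] (fun x => x) false = ["parameter"] :=
  PySem.List.sorted_id_eq_of_perm_of_pairwise _ _ (List.Perm.refl _) (by simp)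

theorem pv_sorted_s : PySem.List.sorted ["storage"] (fun x => x) false = ["storage"] :=
  PySem.List.sorted_id_eq_of_perm_of_pairwise _ _ (List.Perm.refl _) (by simp)

theorem pv_sorted_c : PySem.List.sorted ["calculation"] (fun x => x) false = ["calculation"] :=
  PySem.List.sorted_id_eq_of_perm_of_pairwise _ _ (List.Perm.refl _) (by simp)

theorem pv_sorted_ps : PySem.List.sorted ["parameter", "storage"] (fun x => x) false = ["parameter", "storage"] :=
  PySem.List.sorted_id_eq_of_perm_of_pairwise _ _ (List.Perm.refl _) (by simp; decide)

-- ===== VERDICT (by name: the statement is the Claim_ definition above) =====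
theorem divisor_sources_py_spec : Claim_equal_divisor_sources_py := by
  intro t params states _
  simp only [Spec_divisor_sources_py, divisor_sources_py, divisor_sources_py_alt]
  rw [pv_foldl_cond_add params ([] : PySem.Set String) "parameter" (pvAMatch t.toList)]
  rw [pv_foldl_cond_add states _ "storage" (pvAMatch t.toList)]
  rw [pv_any_match_eq t.toList params, pv_any_match_eq t.toList states, pv_slash_eq t.toList]
  generalize pvBFound t.toList (pvBPositions t.toList 0) params = hp
  generalize pvBFound t.toList (pvBPositions t.toList 0) states = hs
  generalize (pvBPositions t.toList 0).isEmpty = hE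
  cases hp <;> cases hs <;> cases hE <;>
    simp [pv_sorted_nil, pv_sorted_p, pv_sorted_s, pv_sorted_ps, pv_sorted_c]
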